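-- pv_equiv track=rewrite | github.com/leesumin7766/codingex | Ex1/메타넷코테2.py | solution
-- ===== SOURCE A (Python) =====
-- def solution(names, homes, grades):
--     students = [] # 각 학생의 정보를 저장할 리스트
--
--     for i in range(len(names)):
--         name = names[i]
--         home = homes[i]
--         grade = grades[i]
--
--         front_digit = int(str(grade)[0]) # 성적의 첫 번째 자릿수 추출(일의 자리만 구분)
--         x, y = home[0], home[1]          # 집의 x, y 좌표 추출
--         distance = x**2 + y**2           # 집의 좌표를 기준으로 원점에서의 거리 계산
--         students.append((name, front_digit, distance, grade, i))  # 학생 정보를 튜플로 저장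
--
--     students.sort(key=lambda x: (-x[1], -x[2], x[0])) #students 리스트를 특정 정렬 기준에 따라 정렬하는 부분,
--                                                       # sort 함수 = 리스트 정렬 함수(nlog n) /
--                                                       # 정렬 기준 = lambda : 익명 함수(이름이 없는 함수)를 만드는 데 사용
--                                                       #-x[1]: 첫 번째 자릿수 기준 내림차순 (높은 성적을 우선).
--                                                       #-x[2]: 거리가 먼 순서로 내림차순 (원점에서 멀리 사는 학생을 우선).
--                                                       # x[0]: 이름 기준 오름차순 (동일 조건일 경우, 알파벳 순서로 정렬).
--
--     rankings = [0] * len(names) #각 학생의 순위를 저장할 리스트로 초기화.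
--     for rank, student in enumerate(students, 1): # 정렬된 students 리스트를 순회하며 순위를 부여합니다.
--                                                  # 각 학생의 인덱스(student[4])를 기반으로 rankings 리스트의 해당 위치에 순위를 저장합니다.
--         rankings[student[4]] = rank
--     return rankings
-- ===== SOURCE B (Python) =====
-- def solution(names, homes, grades):
--     # No sort: rank each student by counting how many students are strictly ahead
--     # of it under the key (-front_digit, -distance, name), breaking full-key ties
--     # by original position (which reproduces the stable-sort order).
--     keys = []
--     for i in range(len(names)):
--         grade = grades[i]
--         x, y = homes[i]
--         keys.append((-int(str(grade)[0]), -(x * x + y * y), names[i]))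
--     rankings = []
--     for i, k in enumerate(keys):
--         ahead = 0
--         for j, kj in enumerate(keys):
--             if kj < k or (kj == k and j < i):
--                 ahead += 1
--         rankings.append(ahead + 1)
--     return rankings
-- ===== Notes on version B (the rewrite author's own statement) =====
-- stated objective: alternative
-- what changed: Replaces A's stable sort plus rank-scatter into a preallocated list by a sort-free O(n^2) pairwise-counting pass: each student's rank is 1 + the number of students strictly ahead under the key (-front_digit, -distance, name) with full-key ties broken by original position, built directly in input order.
import Mathlib
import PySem

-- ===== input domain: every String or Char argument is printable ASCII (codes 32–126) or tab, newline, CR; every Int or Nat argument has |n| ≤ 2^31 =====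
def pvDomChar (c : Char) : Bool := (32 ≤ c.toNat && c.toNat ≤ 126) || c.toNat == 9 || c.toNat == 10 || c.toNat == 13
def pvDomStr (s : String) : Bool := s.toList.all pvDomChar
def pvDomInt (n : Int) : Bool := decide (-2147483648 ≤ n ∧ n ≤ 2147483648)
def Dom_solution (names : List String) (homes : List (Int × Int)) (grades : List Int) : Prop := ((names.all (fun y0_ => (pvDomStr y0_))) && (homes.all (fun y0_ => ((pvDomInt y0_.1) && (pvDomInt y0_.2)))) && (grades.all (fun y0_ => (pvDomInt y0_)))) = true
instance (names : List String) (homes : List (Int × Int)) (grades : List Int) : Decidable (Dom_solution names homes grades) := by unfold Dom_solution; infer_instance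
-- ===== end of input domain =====

-- B replaces A's stable sort + rank-scatter by a direct O(n^2) pairwise-counting pass that
-- builds the rankings in original order (objective: alternative algorithm, not faster).

-- ===== PORT A =====
-- Python key tuples compare lexicographically; Lex (Int × Lex (Int × List Char)) encodes the
-- 3-tuple (-front_digit, -distance, name): Python's '<' on str is '<' on the char list.
abbrev PvKey : Type := Lex (Int × Lex (Int × List Char))
abbrev PvSt : Type := String × Int × Int × Int × Int

-- int(str(grade)[0]); both Pythons contain this expression verbatim.  The '.getD 0' default is
-- unreachable under Pre_solution (str(g)[0] of a nonnegative g is a digit, so int() succeeds).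
def pvFrontDigit (g : Int) : Int :=
  ((PySem.Str.pyGet? (PySem.Int.toStr g) 0).bind (fun c => PySem.Int.ofChars? [c])).getD 0

-- the sort key lambda: (-x[1], -x[2], x[0])
def pvKeyA (st : PvSt) : PvKey := toLex (-st.2.1, toLex (-st.2.2.1, st.1.toList))

def solution (names : List String) (homes : List (Int × Int)) (grades : List Int) : List Int :=
  let students : List PvSt :=
    (PySem.List.pyRange 0 (names.length : Int) 1).foldl (fun acc i =>
      let name := PySem.List.pyGetD names i ""
      let home := PySem.List.pyGetD homes i ((0 : Int), (0 : Int))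
      let grade := PySem.List.pyGetD grades i 0
      let front_digit := pvFrontDigit grade
      let x := home.1
      let y := home.2
      let distance := x ^ 2 + y ^ 2
      acc ++ [(name, front_digit, distance, grade, i)]) []
  let sortedStudents := PySem.List.sorted students pvKeyA false
  let rankings : List Int := PySem.List.pyRepeat [(0 : Int)] (names.length : Int)
  (PySem.List.enumerate sortedStudents 1).foldl
    (fun r p => PySem.List.pySetD r p.2.2.2.2.2 p.1) rankings

-- ===== PORT B =====
def solution_alt (names : List String) (homes : List (Int × Int)) (grades : List Int) : List Int :=
  let keys : List PvKey :=
    (PySem.List.pyRange 0 (names.length : Int) 1).foldl (fun acc i =>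
      let grade := PySem.List.pyGetD grades i 0
      let home := PySem.List.pyGetD homes i ((0 : Int), (0 : Int))
      let x := home.1
      let y := home.2
      acc ++ [toLex (-(pvFrontDigit grade),
                toLex (-(x * x + y * y), (PySem.List.pyGetD names i "").toList))]) []
  (PySem.List.enumerate keys 0).foldl (fun rankings p =>
    rankings ++
      [((PySem.List.enumerate keys 0).foldl (fun ahead q =>
          if q.2 < p.2 ∨ (q.2 = p.2 ∧ q.1 < p.1) then ahead + 1 else ahead) 0) + 1]) []

-- ===== PRECONDITION & SPEC =====
-- Pre_ excludes exactly the inputs where Python A raises: an i-th home or grade missing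
-- (IndexError) or a negative i-th grade, where int(str(grade)[0]) = int('-') (ValueError).
def Pre_solution (names : List String) (homes : List (Int × Int)) (grades : List Int) : Prop :=
  names.length ≤ homes.length ∧ names.length ≤ grades.length ∧
    ∀ g ∈ grades.take names.length, 0 ≤ g
instance (names : List String) (homes : List (Int × Int)) (grades : List Int) : Decidable (Pre_solution names homes grades) := by unfold Pre_solution; infer_instance

def pvWitness_solution : List String × (List (Int × Int)) × List Int :=
  (["ann", "bob"], [(1, 2), (0, 3)], [85, 92])

def Spec_solution (names : List String) (homes : List (Int × Int)) (grades : List Int) (out : List Int) : Prop := out = solution_alt names homes grades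
instance (names : List String) (homes : List (Int × Int)) (grades : List Int) (out : List Int) : Decidable (Spec_solution names homes grades out) := by unfold Spec_solution; infer_instance

-- ===== CLAIM (what is proved, stated in full; the proofs are below) =====
def Claim_equal_solution : Prop := ∀ (names : List String) (homes : List (Int × Int)) (grades : List Int), Dom_solution names homes grades → Pre_solution names homes grades → Spec_solution names homes grades (solution names homes grades)

-- ===== LEMMAS AND PROOFS =====

-- the i-th student tuple
def pvSt (names : List String) (homes : List (Int × Int)) (grades : List Int) (i : Nat) : PvSt :=
  (names.getD i "", pvFrontDigit (grades.getD i 0),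
   (homes.getD i (0, 0)).1 ^ 2 + (homes.getD i (0, 0)).2 ^ 2, grades.getD i 0, (i : Int))
def pvK2 (x : PvSt) : Lex (PvKey × Int) := toLex (pvKeyA x, x.2.2.2.2)

lemma pv_students_eq (names : List String) (homes : List (Int × Int)) (grades : List Int) :
    (PySem.List.pyRange 0 (names.length : Int) 1).foldl (fun acc i =>
      acc ++ [(PySem.List.pyGetD names i "", pvFrontDigit (PySem.List.pyGetD grades i 0),
        (PySem.List.pyGetD homes i ((0 : Int), (0 : Int))).1 ^ 2
          + (PySem.List.pyGetD homes i ((0 : Int), (0 : Int))).2 ^ 2,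
        PySem.List.pyGetD grades i 0, i)]) []
      = (List.range names.length).map (pvSt names homes grades) := by
  rw [PySem.List.pyRange_zero_natCast, List.foldl_map, PySem.List.foldl_append_singleton_eq_map]
  simp [pvSt]

lemma pv_insert_congr (x : PvSt) (acc : List PvSt)
    (h : ∀ y ∈ acc, y.2.2.2.2 < x.2.2.2.2) :
    PySem.List.insertBy (fun a b => decide (pvKeyA a < pvKeyA b)) x acc
      = PySem.List.insertBy (fun a b => decide (pvK2 a < pvK2 b)) x acc := by
  induction acc with
  | nil => rfl
  | cons y ys ih =>
    have hy := h y (by simp)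
    have hkey : (pvKeyA x < pvKeyA y) ↔ (pvK2 x < pvK2 y) := by
      unfold pvK2
      rw [Prod.Lex.toLex_lt_toLex]
      constructor
      · exact fun h' => Or.inl h'
      · rintro (h' | ⟨h1, h2⟩)
        · exact h'
        · exact absurd h2 (by omega)
    simp only [PySem.List.insertBy]
    by_cases hc : pvK2 x < pvK2 y
    · rw [if_pos (by simpa using hkey.mpr hc), if_pos (by simpa using hc)]
    · rw [if_neg (by simpa using fun h' => hc (hkey.mp h')), if_neg (by simpa using hc),
        ih (fun y hy => h y (by simp [hy]))]

lemma pv_fold_insert_congr (l acc : List PvSt)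
    (h1 : l.Pairwise (fun a b => a.2.2.2.2 < b.2.2.2.2))
    (h2 : ∀ x ∈ l, ∀ y ∈ acc, y.2.2.2.2 < x.2.2.2.2) :
    l.foldl (fun a x => PySem.List.insertBy (fun a b => decide (pvKeyA a < pvKeyA b)) x a) acc
      = l.foldl (fun a x => PySem.List.insertBy (fun a b => decide (pvK2 a < pvK2 b)) x a) acc := by
  induction l generalizing acc with
  | nil => rfl
  | cons x t ih =>
    simp only [List.foldl_cons]
    rw [pv_insert_congr x acc (h2 x (by simp))]
    exact ih _ (List.Pairwise.of_cons h1) (by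
      intro z hz y hy
      rcases (PySem.List.mem_insertBy _ x y acc).mp hy with rfl | hy'
      · exact List.rel_of_pairwise_cons h1 hz
      · exact h2 z (by simp [hz]) y hy')

lemma pv_sorted_stable (l : List PvSt)
    (h1 : l.Pairwise (fun a b => a.2.2.2.2 < b.2.2.2.2)) :
    PySem.List.sorted l pvKeyA false = PySem.List.sorted l pvK2 false := by
  rw [PySem.List.sorted_eq_foldl_insertBy, PySem.List.sorted_eq_foldl_insertBy]
  exact pv_fold_insert_congr l [] h1 (by simp)

lemma pv_pos_spec (s : List PvSt) (hpw : s.Pairwise (fun a b => pvK2 a < pvK2 b))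
    (x : PvSt) (hx : x ∈ s) :
    s[s.countP (fun y => decide (pvK2 y < pvK2 x))]? = some x := by
  revert hpw hx
  induction s with
  | nil => intro _ hx; simp at hx
  | cons hd t ih =>
    intro hpw hx
    rcases List.mem_cons.mp hx with heq | hx'
    · subst heq
      have hzero : (x :: t).countP (fun y => decide (pvK2 y < pvK2 x)) = 0 := by
        rw [List.countP_eq_zero]
        intro y hy
        rcases List.mem_cons.mp hy with rfl | hy'
        · simp
        · have := List.rel_of_pairwise_cons hpw hy'
          simp only [decide_eq_true_eq]
          exact fun hlt => absurd (lt_trans this hlt) (lt_irrefl _)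
      rw [hzero]; simp
    · have hlt : pvK2 hd < pvK2 x := List.rel_of_pairwise_cons hpw hx'
      rw [List.countP_cons]
      simp only [decide_eq_true_eq, hlt, if_pos]
      have := ih (List.Pairwise.of_cons hpw) hx'
      simpa using this

lemma pv_enumerate_map_range {α : Type} (f : Nat → α) (n : Nat) (s : Int) :
    PySem.List.enumerate ((List.range n).map f) s
      = (List.range n).map (fun (j : Nat) => (s + (j : Int), f j)) := by
  induction n with
  | zero => simp [PySem.List.enumerate_nil]
  | succ m ih =>
    rw [List.range_succ, List.map_append, List.map_append,
      PySem.List.enumerate_append, ih]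
    simp [PySem.List.enumerate_cons, PySem.List.enumerate_nil]

lemma pv_find_enumerate (s : List PvSt) (pred : PvSt → Bool) (k : Int) (P : Nat) (x : PvSt)
    (hP : s[P]? = some x) (hx : pred x)
    (huniq : ∀ q (hq : q < s.length), pred s[q] → q = P) :
    (PySem.List.enumerate s k).find? (fun p => pred p.2) = some (k + (P : Int), x) := by
  induction s generalizing k P with
  | nil => simp at hP
  | cons hd t ih =>
    rw [PySem.List.enumerate_cons, List.find?_cons]
    by_cases hh : pred hd
    · have hP0 : P = 0 := by
        have := huniq 0 (by simp) (by simpa using hh)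
        omega
      subst hP0
      simp only [hh]
      have : hd = x := by simpa using hP
      subst this
      simp
    · have hPne : P ≠ 0 := by
        rintro rfl
        have : hd = x := by simpa using hP
        subst this
        exact hh hx
      obtain ⟨P', rfl⟩ : ∃ P', P = P' + 1 := ⟨P - 1, by omega⟩
      simp only [hh]
      have := ih (k + 1) P' (by simpa using hP) (by
        intro q hq hpq
        have := huniq (q + 1) (by simpa using Nat.succ_lt_succ hq) (by simpa using hpq)
        omega)
      rw [this]
      congr 1
      push_cast
      ring_nf

lemma pv_scatter_length (ps : List (Int × PvSt)) (r : List Int) :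
    (ps.foldl (fun r p => PySem.List.pySetD r p.2.2.2.2.2 p.1) r).length = r.length := by
  induction ps generalizing r with
  | nil => rfl
  | cons p t ih => rw [List.foldl_cons, ih, PySem.List.length_pySetD]

lemma pv_scatter_get (ps : List (Int × PvSt)) (r : List Int)
    (hnd : (ps.map (fun p => p.2.2.2.2.2)).Nodup)
    (hb : ∀ p ∈ ps, ∃ m : Nat, p.2.2.2.2.2 = (m : Int) ∧ m < r.length) (i : Nat) :
    (ps.foldl (fun r p => PySem.List.pySetD r p.2.2.2.2.2 p.1) r)[i]? =
      (match ps.find? (fun p => p.2.2.2.2.2 == (i : Int)) with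
       | some p => some p.1
       | none => r[i]?) := by
  induction ps generalizing r with
  | nil => simp
  | cons p t ih =>
    obtain ⟨m, hm, hmlt⟩ := hb p (by simp)
    rw [List.foldl_cons, List.find?_cons]
    by_cases hpi : p.2.2.2.2.2 = (i : Int)
    · have hmi : m = i := by omega
      subst hmi
      have hc : (p.2.2.2.2.2 == (m : Int)) = true := by simpa using hpi
      simp only [hc]
      have hnone : t.find? (fun q => q.2.2.2.2.2 == (m : Int)) = none := by
        rw [List.find?_eq_none]
        intro q hq
        simp only [beq_iff_eq]
        intro hqi
        have : p.2.2.2.2.2 ∈ t.map (fun q => q.2.2.2.2.2) := by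
          rw [hpi, ← hqi]; exact List.mem_map_of_mem hq
        exact (List.nodup_cons.mp hnd).1 this
      have := ih (PySem.List.pySetD r p.2.2.2.2.2 p.1)
        (List.nodup_cons.mp hnd).2
        (by
          intro q hq
          obtain ⟨m', hm', hlt'⟩ := hb q (by simp [hq])
          exact ⟨m', hm', by rwa [PySem.List.length_pySetD]⟩)
      rw [this, hnone]
      rw [hm, PySem.List.pySetD_natCast]
      simp [hmlt]
    · have hc : (p.2.2.2.2.2 == (i : Int)) = false := by simpa using hpi
      simp only [hc]
      have hmi : m ≠ i := by omega
      have := ih (PySem.List.pySetD r p.2.2.2.2.2 p.1)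
        (List.nodup_cons.mp hnd).2
        (by
          intro q hq
          obtain ⟨m', hm', hlt'⟩ := hb q (by simp [hq])
          exact ⟨m', hm', by rwa [PySem.List.length_pySetD]⟩)
      rw [this]
      have hset : (PySem.List.pySetD r p.2.2.2.2.2 p.1)[i]? = r[i]? := by
        rw [hm, PySem.List.pySetD_natCast]
        exact List.getElem?_set_ne (by omega)
      cases t.find? (fun q => q.2.2.2.2.2 == (i : Int)) <;> simp [hset]

lemma pv_keys_eq (names : List String) (homes : List (Int × Int)) (grades : List Int) :
    (PySem.List.pyRange 0 (names.length : Int) 1).foldl (fun acc i =>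
      acc ++ [toLex (-(pvFrontDigit (PySem.List.pyGetD grades i 0)),
        toLex (-((PySem.List.pyGetD homes i ((0 : Int), (0 : Int))).1
                  * (PySem.List.pyGetD homes i ((0 : Int), (0 : Int))).1
                + (PySem.List.pyGetD homes i ((0 : Int), (0 : Int))).2
                  * (PySem.List.pyGetD homes i ((0 : Int), (0 : Int))).2),
              (PySem.List.pyGetD names i "").toList))]) []
      = (List.range names.length).map (fun j => pvKeyA (pvSt names homes grades j)) := by
  rw [PySem.List.pyRange_zero_natCast, List.foldl_map, PySem.List.foldl_append_singleton_eq_map]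
  simp [pvSt, pvKeyA, pow_two]

lemma pv_foldl_count {α : Type} (l : List α) (P : α → Prop) [DecidablePred P] :
    l.foldl (fun c x => if P x then c + 1 else c) (0 : Int)
      = ((l.countP (fun x => decide (P x)) : Int)) := by
  rw [show (fun (c : Int) x => if P x then c + 1 else c)
      = (fun (c : Int) x => if (fun x => decide (P x)) x = true then c + 1 else c) from by
    funext c x; simp]
  rw [PySem.List.foldl_count_if]
  simp

lemma pv_main (names : List String) (homes : List (Int × Int)) (grades : List Int) :
    solution names homes grades = solution_alt names homes grades := by
  have hpwidx : ((List.range names.length).map (pvSt names homes grades)).Pairwise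
      (fun a b => a.2.2.2.2 < b.2.2.2.2) := by
    refine List.Pairwise.map _ ?_ (List.pairwise_lt_range)
    intro a b hab
    simpa [pvSt] using hab
  have hA : solution names homes grades =
      (PySem.List.enumerate (PySem.List.sorted
          ((List.range names.length).map (pvSt names homes grades)) pvK2 false) 1).foldl
        (fun r p => PySem.List.pySetD r p.2.2.2.2.2 p.1)
        (List.replicate names.length (0 : Int)) := by
    simp only [solution]
    rw [pv_students_eq, pv_sorted_stable _ hpwidx, PySem.List.pyRepeat_singleton]
    simp
  have hB : solution_alt names homes grades =
      (List.range names.length).map (fun i =>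
        ((List.range names.length).countP (fun j =>
            decide (pvKeyA (pvSt names homes grades j) < pvKeyA (pvSt names homes grades i)
              ∨ (pvKeyA (pvSt names homes grades j) = pvKeyA (pvSt names homes grades i)
                  ∧ (j : Int) < (i : Int)))) : Int) + 1) := by
    simp only [solution_alt]
    rw [pv_keys_eq, pv_enumerate_map_range]
    rw [List.foldl_map, PySem.List.foldl_append_singleton_eq_map]
    simp only [List.nil_append, List.foldl_map, zero_add]
    refine List.map_congr_left ?_
    intro i hi
    rw [pv_foldl_count]
  rw [hA, hB]
  have hperm := PySem.List.sorted_perm ((List.range names.length).map (pvSt names homes grades)) pvK2 false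
  have hle := PySem.List.sorted_pairwise ((List.range names.length).map (pvSt names homes grades)) pvK2
  set n := names.length with hn
  set st := pvSt names homes grades with hstdef
  set students := (List.range n).map st with hstu
  set s := PySem.List.sorted students pvK2 false with hsdef
  have hstinj : Function.Injective st := by
    intro a b hab
    have := congrArg (fun y : PvSt => y.2.2.2.2) hab
    simpa [hstdef, pvSt] using this
  have hndstu : students.Nodup := (List.nodup_range).map hstinj
  have hnds : s.Nodup := hperm.nodup_iff.mpr hndstu
  have hmem : ∀ y ∈ s, ∃ j, j < n ∧ y = st j := by
    intro y hy
    obtain ⟨j, hj, rfl⟩ := List.mem_map.mp (hperm.subset hy)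
    exact ⟨j, List.mem_range.mp hj, rfl⟩
  have hstrict : s.Pairwise (fun a b => pvK2 a < pvK2 b) := by
    refine List.Pairwise.imp_of_mem ?_ (List.Pairwise.and hle hnds)
    intro a b ha hb ⟨h1, h2⟩
    refine lt_of_le_of_ne h1 ?_
    intro hk
    obtain ⟨ja, hja, rfl⟩ := hmem a ha
    obtain ⟨jb, hjb, rfl⟩ := hmem b hb
    have : ((ja : Int)) = (jb : Int) := by
      have := congrArg (fun z : Lex (PvKey × Int) => (ofLex z).2) hk
      simpa [pvK2, hstdef, pvSt] using this
    exact h2 (by simp [hstdef, pvSt, Int.natCast_inj.mp this])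
  have hmapidx : (PySem.List.enumerate s 1).map (fun p => p.2.2.2.2.2)
      = s.map (fun y => y.2.2.2.2) := by
    conv_rhs => rw [← PySem.List.map_snd_enumerate s 1]
    rw [List.map_map]
    rfl
  have hndidx : ((PySem.List.enumerate s 1).map (fun p => p.2.2.2.2.2)).Nodup := by
    rw [hmapidx]
    refine ((hperm.map (fun y : PvSt => y.2.2.2.2)).nodup_iff).mpr ?_
    rw [hstu, List.map_map]
    have : ((fun y : PvSt => y.2.2.2.2) ∘ st) = (fun j : Nat => (j : Int)) := by
      funext j; simp [hstdef, pvSt]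
    rw [this]
    exact (List.nodup_range).map (fun a b h => Int.natCast_inj.mp h)
  have hb : ∀ p ∈ PySem.List.enumerate s 1, ∃ m : Nat, p.2.2.2.2.2 = (m : Int)
      ∧ m < (List.replicate n (0 : Int)).length := by
    intro p hp
    obtain ⟨k, hk, rfl⟩ := (PySem.List.mem_enumerate_iff _ _ _).mp hp
    obtain ⟨j, hj, hji⟩ := hmem s[k] (List.getElem_mem hk)
    exact ⟨j, by simp [hji, hstdef, pvSt], by simpa using hj⟩
  refine List.ext_getElem? ?_
  intro i
  by_cases hi : i < n
  · have hmemi : st i ∈ s := hperm.mem_iff.mpr (List.mem_map_of_mem (List.mem_range.mpr hi))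
    have hsome := pv_pos_spec s hstrict (st i) hmemi
    set P := s.countP (fun y => decide (pvK2 y < pvK2 (st i))) with hPdef
    have hPlt : P < s.length := (List.getElem?_eq_some_iff.mp hsome).1
    have hgetP : s[P] = st i := by
      have := (List.getElem?_eq_some_iff.mp hsome).2
      exact this
    have hfind := pv_find_enumerate s (fun y => y.2.2.2.2 == (i : Int)) 1 P (st i)
      hsome (by simp [hstdef, pvSt]) ?_
    · rw [pv_scatter_get _ _ hndidx hb i, hfind]
      rw [List.getElem?_map, List.getElem?_range hi]
      simp only [Option.map_some]
      congr 1
      have hcnt : P = (List.range n).countP (fun j =>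
          decide (pvKeyA (st j) < pvKeyA (st i)
            ∨ (pvKeyA (st j) = pvKeyA (st i) ∧ (j : Int) < (i : Int)))) := by
        rw [hPdef, hperm.countP_eq, hstu, List.countP_map]
        refine List.countP_congr ?_
        intro j hj
        simp only [Function.comp]
        simp only [decide_eq_true_eq]
        rw [pvK2, pvK2, Prod.Lex.toLex_lt_toLex]
        constructor
        · rintro (h | ⟨h1, h2⟩)
          · exact Or.inl h
          · exact Or.inr ⟨h1, by simpa [hstdef, pvSt] using h2⟩
        · rintro (h | ⟨h1, h2⟩)
          · exact Or.inl h
          · exact Or.inr ⟨h1, by simpa [hstdef, pvSt] using h2⟩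
      rw [← hcnt]
      ring
    · intro q hq hpredq
      obtain ⟨j, hj, hji⟩ := hmem s[q] (List.getElem_mem hq)
      have hidx : (j : Int) = (i : Int) := by
        have : s[q].2.2.2.2 = (i : Int) := by simpa using hpredq
        rw [hji] at this
        simpa [hstdef, pvSt] using this
      have hqi : s[q] = st i := by rw [hji, Int.natCast_inj.mp hidx]
      rcases lt_trichotomy q P with hlt | heq | hgt
      · exfalso
        have := (List.pairwise_iff_getElem.mp hstrict) q P hq hPlt hlt
        rw [hqi, hgetP] at this
        exact lt_irrefl _ this
      · exact heq
      · exfalso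
        have := (List.pairwise_iff_getElem.mp hstrict) P q hPlt hq hgt
        rw [hqi, hgetP] at this
        exact lt_irrefl _ this
  · have hlen : n ≤ i := Nat.le_of_not_lt hi
    rw [List.getElem?_eq_none, List.getElem?_eq_none]
    · simpa using hlen
    · rw [pv_scatter_length]
      simpa using hlen

-- ===== VERDICT (by name: the statement is the Claim_ definition above) =====
theorem solution_spec : Claim_equal_solution := by
  intro names homes grades _ _
  unfold Spec_solution
  exact pv_main names homes grades
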